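-- pv_equiv track=rewrite | github.com/yowatanabe/learn-to-code | python/383/main.py | filter_no_repeat_within_k
-- ===== SOURCE A (Python) =====
-- from typing import List
-- from collections import deque, defaultdict
--
-- def filter_no_repeat_within_k(ids: List[int], k: int) -> List[int]:
--     """
--     out の直近 k 件に同じIDがあれば捨てるフィルタ。
--
--     方針:
--     - 直近k件のIDの出現数をカウントする辞書 cnt を持つ
--     - out に追加したIDをキュー window に積む（最大サイズ k）
--     - 追加時:
--         - もし cnt[id] > 0 なら直近k件に存在 → 捨てる
--         - そうでなければ追加し、window と cnt を更新
--     - window が k を超えたら古いIDを1つ落とし cnt を減らす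
--
--     計算量: O(n)
--     """
--     if k <= 0:
--         # 本制約では k>=1 だが安全のため
--         return ids[:]
--
--     out: List[int] = []
--     window = deque()           # out の末尾側から最大 k 個
--     cnt = defaultdict(int)     # window 内の出現数
--
--     for x in ids:
--         if cnt[x] > 0:
--             continue  # 直近k件に同じIDがあるので捨てる
--
--         # out に追加
--         out.append(x)
--         window.append(x)
--         cnt[x] += 1
--
--         # window を最大 k に保つ
--         if len(window) > k:
--             old = window.popleft()
--             cnt[old] -= 1
--             if cnt[old] == 0:
--                 del cnt[old]
--
--     return out
-- ===== SOURCE B (Python) =====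
-- from typing import List
--
-- def filter_no_repeat_within_k(ids: List[int], k: int) -> List[int]:
--     """Emit each id unless it was among the last k emitted, tracked by a dict
--     of last emission positions instead of a deque+counter window."""
--     if k <= 0:
--         return ids[:]
--     out: List[int] = []
--     last_pos = {}
--     for x in ids:
--         p = last_pos.get(x)
--         if p is None or p < len(out) - k:
--             last_pos[x] = len(out)
--             out.append(x)
--     return out
-- ===== Notes on version B (the rewrite author's own statement) =====
-- stated objective: simpler
-- what changed: Replaced the deque window + occurrence-counter dict (with an eviction step per emission) by a single dict mapping each id to its last emission index; an id is emitted iff its last position is below len(out)-k, so there is no window structure and no eviction loop.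
import Mathlib
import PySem

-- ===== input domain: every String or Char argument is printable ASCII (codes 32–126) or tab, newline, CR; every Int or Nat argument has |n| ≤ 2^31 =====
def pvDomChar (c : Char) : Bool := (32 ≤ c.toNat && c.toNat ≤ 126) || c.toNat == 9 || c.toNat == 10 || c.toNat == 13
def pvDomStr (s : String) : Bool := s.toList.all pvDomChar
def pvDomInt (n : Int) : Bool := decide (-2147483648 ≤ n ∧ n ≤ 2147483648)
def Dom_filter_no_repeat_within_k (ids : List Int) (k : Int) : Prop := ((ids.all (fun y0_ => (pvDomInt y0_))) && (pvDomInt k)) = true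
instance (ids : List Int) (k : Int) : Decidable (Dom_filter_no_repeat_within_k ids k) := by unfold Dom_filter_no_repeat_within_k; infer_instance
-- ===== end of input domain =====

-- B replaces A's deque window + occurrence-counter dict (with an eviction step) by a single
-- dict of last emission positions; same return values, a simpler single-structure loop.


-- ===== PORT A =====
-- loop body of A: state is (out, window, cnt); `cnt[x]` on the defaultdict is read as getD 0
-- (the defaultdict's silent insertion of a 0 entry only touches cnt, never the result),
-- `cnt[x] += 1` / `cnt[old] -= 1` are Dict.modify with default 0, `window.popleft()` is head/tail.
def stepA (k : Int) (st : List Int × List Int × PySem.Dict Int Int) (x : Int) :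
    List Int × List Int × PySem.Dict Int Int :=
  if 0 < st.2.2.getD x 0 then st
  else
    let out := st.1 ++ [x]
    let window := st.2.1 ++ [x]
    let cnt := st.2.2.modify x 0 (· + 1)
    if (window.length : Int) > k then
      let old := window.headI
      let window2 := window.tail
      let cnt2 := cnt.modify old 0 (· - 1)
      let cnt3 := if cnt2.getD old 0 == 0 then cnt2.erase old else cnt2
      (out, window2, cnt3)
    else (out, window, cnt)

def filter_no_repeat_within_k (ids : List Int) (k : Int) : List Int :=
  if k ≤ 0 then ids
  else (ids.foldl (stepA k) ([], [], PySem.Dict.empty)).1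

-- ===== PORT B =====
-- loop body of B: state is (out, last_pos); `p = last_pos.get(x)`, emit iff p is None
-- or p < len(out) - k, recording last_pos[x] = len(out) at emission.
def stepB (k : Int) (st : List Int × PySem.Dict Int Int) (x : Int) :
    List Int × PySem.Dict Int Int :=
  match st.2.get? x with
  | none => (st.1 ++ [x], st.2.insert x (st.1.length : Int))
  | some p =>
      if p < (st.1.length : Int) - k then (st.1 ++ [x], st.2.insert x (st.1.length : Int))
      else st

def filter_no_repeat_within_k_alt (ids : List Int) (k : Int) : List Int :=
  if k ≤ 0 then ids
  else (ids.foldl (stepB k) ([], PySem.Dict.empty)).1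

-- ===== PRECONDITION & SPEC =====
def Spec_filter_no_repeat_within_k (ids : List Int) (k : Int) (out : List Int) : Prop := out = filter_no_repeat_within_k_alt ids k
instance (ids : List Int) (k : Int) (out : List Int) : Decidable (Spec_filter_no_repeat_within_k ids k out) := by unfold Spec_filter_no_repeat_within_k; infer_instance

-- ===== CLAIM (what is proved, stated in full; the proofs are below) =====
def Claim_equal_filter_no_repeat_within_k : Prop := ∀ (ids : List Int) (k : Int), Dom_filter_no_repeat_within_k ids k → Spec_filter_no_repeat_within_k ids k (filter_no_repeat_within_k ids k)

-- ===== LEMMAS AND PROOFS =====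

-- the last index in `out` at which `y` was emitted (what B's last_pos stores), none if never
def lastPosI (out : List Int) (y : Int) : Option Int :=
  if y ∈ out then some ((out.length - 1 - out.reverse.idxOf y : Nat) : Int) else none

-- coupling invariant between A's state (out, window, cnt) and B's state (out, lp)
def InvAB (k : Int) (out window : List Int) (cnt lp : PySem.Dict Int Int) : Prop :=
  window = out.drop (out.length - k.toNat) ∧
  window.Nodup ∧
  (∀ y, cnt.getD y 0 = (window.count y : Int)) ∧
  (∀ y, lp.get? y = lastPosI out y)

theorem find?_filter_ne (l : List (Int × Int)) (k k' : Int) :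
    ((l.filter (fun p => !(p.1 == k))).find? (fun p => p.1 == k')) =
      if k' = k then none else l.find? (fun p => p.1 == k') := by
  induction l with
  | nil => simp
  | cons p t ih =>
    by_cases h1 : p.1 = k
    · by_cases h2 : p.1 = k'
      · have hkk : k' = k := by rw [← h1, ← h2]
        simp [List.filter_cons, h1, ih, hkk]
      · have hkk : k' ≠ k := fun e => h2 (by rw [h1, e])
        have hb : (k == k') = false := beq_eq_false_iff_ne.mpr (fun e => hkk e.symm)
        simp [List.filter_cons, List.find?_cons, h1, h2, ih, hkk, hb]
    · by_cases h2 : p.1 = k'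
      · have hkk : k' ≠ k := fun e => h1 (by rw [h2, e])
        simp [List.filter_cons, List.find?_cons, h1, h2, ih, hkk]
      · simp [List.filter_cons, List.find?_cons, h1, h2, ih]

theorem dict_get?_erase (d : PySem.Dict Int Int) (k k' : Int) :
    (d.erase k).get? k' = if k' = k then none else d.get? k' := by
  obtain ⟨l⟩ := d
  simp only [PySem.Dict.erase, PySem.Dict.get?]
  rw [find?_filter_ne]
  split_ifs <;> simp

theorem dict_getD_erase (d : PySem.Dict Int Int) (k k' : Int) :
    (d.erase k).getD k' 0 = if k' = k then 0 else d.getD k' 0 := by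
  rw [PySem.Dict.getD_eq_get?_getD, dict_get?_erase]
  split_ifs <;> simp [← PySem.Dict.getD_eq_get?_getD]

theorem mem_take_iff_idxOf (l : List Int) (y : Int) (n : Nat) :
    y ∈ l.take n ↔ y ∈ l ∧ l.idxOf y < n := by
  induction l generalizing n with
  | nil => simp
  | cons b t ih =>
    cases n with
    | zero => simp
    | succ n =>
      by_cases hby : b = y
      · subst hby
        simp [List.take_succ_cons, List.idxOf_cons_self]
      · simp [List.take_succ_cons, List.mem_cons, hby, Ne.symm hby, ih,
          List.idxOf_cons_ne _ hby, Nat.succ_lt_succ_iff]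

theorem mem_suffix_iff_idxOf_rev (l : List Int) (y : Int) (kn : Nat) :
    y ∈ l.drop (l.length - kn) ↔ y ∈ l ∧ l.reverse.idxOf y < kn := by
  have h1 : y ∈ l.drop (l.length - kn) ↔ y ∈ l.reverse.take (l.length - (l.length - kn)) := by
    rw [← List.reverse_drop, List.mem_reverse]
  rw [h1, mem_take_iff_idxOf, List.mem_reverse]
  constructor
  · rintro ⟨hy, hlt⟩
    have hj : l.reverse.idxOf y < l.length := by
      have := List.idxOf_lt_length_of_mem (List.mem_reverse.mpr hy)
      simpa using this
    exact ⟨hy, by omega⟩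
  · rintro ⟨hy, hlt⟩
    have hj : l.reverse.idxOf y < l.length := by
      have := List.idxOf_lt_length_of_mem (List.mem_reverse.mpr hy)
      simpa using this
    exact ⟨hy, by omega⟩

theorem lastPosI_append (out : List Int) (x y : Int) :
    lastPosI (out ++ [x]) y = if y = x then some (out.length : Int) else lastPosI out y := by
  by_cases hyx : y = x
  · subst hyx
    simp [lastPosI, List.reverse_append, List.idxOf_cons_self]
  · by_cases hm : y ∈ out
    · have hmm : y ∈ out ++ [x] := List.mem_append_left _ hm
      rw [lastPosI, if_pos hmm, if_neg hyx, lastPosI, if_pos hm]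
      rw [List.reverse_append, List.reverse_singleton, List.singleton_append,
        List.idxOf_cons_ne _ (fun e => hyx e.symm)]
      congr 1
      simp
      omega
    · have hmm : y ∉ out ++ [x] := by simp [hm, hyx]
      rw [lastPosI, if_neg hmm, if_neg hyx, lastPosI, if_neg hm]

theorem step_agree (k : Int) (hk : 0 < k) (x : Int) (out window : List Int)
    (cnt lp : PySem.Dict Int Int) (h : InvAB k out window cnt lp) :
    ∃ out' window' cnt' lp',
      stepA k (out, window, cnt) x = (out', window', cnt') ∧
      stepB k (out, lp) x = (out', lp') ∧ InvAB k out' window' cnt' lp' := by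
  obtain ⟨hw, hnd, hcnt, hlp⟩ := h
  by_cases hx : x ∈ window
  · -- A skips; x is among the last k emitted, so B skips too
    have hxo : x ∈ out ∧ out.reverse.idxOf x < k.toNat := by
      rw [hw] at hx
      exact (mem_suffix_iff_idxOf_rev out x k.toNat).mp hx
    have hj : out.reverse.idxOf x < out.length := by
      have := List.idxOf_lt_length_of_mem (List.mem_reverse.mpr hxo.1)
      simpa using this
    have hA : stepA k (out, window, cnt) x = (out, window, cnt) := by
      have hpos : 0 < cnt.getD x 0 := by
        rw [hcnt x]
        exact_mod_cast List.count_pos_iff.mpr hx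
      simp [stepA, hpos]
    have hget : lp.get? x = some ((out.length - 1 - out.reverse.idxOf x : Nat) : Int) := by
      rw [hlp x, lastPosI, if_pos hxo.1]
    have hcond : ¬ (((out.length - 1 - out.reverse.idxOf x : Nat) : Int) < (out.length : Int) - k) := by
      have := hxo.2
      omega
    have hB : stepB k (out, lp) x = (out, lp) := by
      simp [stepB, hget, hcond]
    exact ⟨out, window, cnt, lp, hA, hB, hw, hnd, hcnt, hlp⟩
  · -- both emit x
    have hc0 : cnt.getD x 0 = 0 := by
      rw [hcnt x, List.count_eq_zero.mpr hx]
      rfl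
    have hB : stepB k (out, lp) x = (out ++ [x], lp.insert x (out.length : Int)) := by
      by_cases hmem : x ∈ out
      · have hj : out.reverse.idxOf x < out.length := by
          have := List.idxOf_lt_length_of_mem (List.mem_reverse.mpr hmem)
          simpa using this
        have hge : k.toNat ≤ out.reverse.idxOf x := by
          by_contra hlt
          exact hx (hw ▸ (mem_suffix_iff_idxOf_rev out x k.toNat).mpr ⟨hmem, by omega⟩)
        have hget : lp.get? x = some ((out.length - 1 - out.reverse.idxOf x : Nat) : Int) := by
          rw [hlp x, lastPosI, if_pos hmem]
        have hcond : ((out.length - 1 - out.reverse.idxOf x : Nat) : Int) < (out.length : Int) - k := by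
          omega
        simp [stepB, hget, hcond]
      · have hget : lp.get? x = none := by
          rw [hlp x, lastPosI, if_neg hmem]
        simp [stepB, hget]
    have hlp' : ∀ y, (lp.insert x (out.length : Int)).get? y = lastPosI (out ++ [x]) y := by
      intro y
      rw [lastPosI_append, PySem.Dict.get?_insert]
      by_cases hy : y = x <;> simp [hy, hlp y]
    by_cases hL : k.toNat ≤ out.length
    · -- the window is full: A pops its oldest element
      have hwlen : window.length = k.toNat := by
        rw [hw, List.length_drop]
        omega
      have hwne : window ≠ [] := by
        intro h0
        rw [h0] at hwlen
        simp at hwlen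
        omega
      obtain ⟨old, t, rfl⟩ : ∃ old t, window = old :: t := by
        cases window with
        | nil => exact absurd rfl hwne
        | cons a b => exact ⟨a, b, rfl⟩
      have hox : old ≠ x := by
        intro e
        subst e
        exact hx (by simp)
      have hxt : x ∉ t := by
        intro hmem
        exact hx (by simp [hmem])
      have hot : old ∉ t := (List.nodup_cons.mp hnd).1
      have htnd : t.Nodup := (List.nodup_cons.mp hnd).2
      have h0len : t.length + 1 = k.toNat := by simpa using hwlen
      have hlen2 : (((old :: t) ++ [x]).length : Int) > k := by
        push_cast
        simp
        omega
      have h2old : ((cnt.modify x 0 (· + 1)).modify old 0 (· - 1)).getD old 0 = 0 := by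
        rw [PySem.Dict.getD_modify_self, PySem.Dict.getD_modify, if_neg hox, hcnt old]
        have h1 : (old :: t).count old = 1 := by
          rw [List.count_cons_self, List.count_eq_zero.mpr hot]
        rw [h1]
        norm_num
      have hA : stepA k (out, old :: t, cnt) x =
          (out ++ [x], t ++ [x], ((cnt.modify x 0 (· + 1)).modify old 0 (· - 1)).erase old) := by
        simp [stepA, hc0, h2old]
        omega
      refine ⟨out ++ [x], t ++ [x], _, _, hA, hB, ?_, ?_, ?_, hlp'⟩
      · -- window shape
        have ht : t = out.drop (out.length - k.toNat + 1) := by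
          rw [← List.tail_drop, ← hw]
          rfl
        have hidx : (out ++ [x]).length - k.toNat = out.length - k.toNat + 1 := by
          simp
          omega
        rw [hidx, List.drop_append_of_le_length (by omega), ← ht]
      · -- nodup
        simp [List.nodup_append, htnd]
        exact fun a ha e => hxt (e ▸ ha)
      · -- counts
        intro y
        rw [dict_getD_erase]
        by_cases hyo : y = old
        · subst hyo
          simp [List.count_append, List.count_eq_zero.mpr hot, List.count_singleton]
          exact fun e => hox e.symm
        · rw [if_neg hyo, PySem.Dict.getD_modify, if_neg hyo, PySem.Dict.getD_modify]
          by_cases hyx : y = x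
          · subst hyx
            rw [if_pos rfl, hcnt y]
            have hcy : (old :: t).count y = 0 := List.count_eq_zero.mpr hx
            have hcyt : t.count y = 0 := List.count_eq_zero.mpr hxt
            simp [List.count_append, hcy, hcyt]
          · rw [if_neg hyx, hcnt y]
            simp [List.count_append, List.count_cons, Ne.symm hyo, Ne.symm hyx, hyx]
    · -- window not yet full: no pop
      have hw0 : window = out := by
        rw [hw, Nat.sub_eq_zero_of_le (by omega), List.drop_zero]
      have hwl : window.length = out.length := by rw [hw0]
      have hlen2 : ¬ (((window ++ [x]).length : Int) > k) := by
        simp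
        omega
      have hA : stepA k (out, window, cnt) x =
          (out ++ [x], window ++ [x], cnt.modify x 0 (· + 1)) := by
        simp [stepA, hc0]
        intro hcon
        exfalso
        omega
      refine ⟨out ++ [x], window ++ [x], _, _, hA, hB, ?_, ?_, ?_, hlp'⟩
      · have h0 : (out ++ [x]).length - k.toNat = 0 := by
          simp
          omega
        rw [h0, List.drop_zero, hw0]
      · simp [List.nodup_append, hnd]
        exact fun a ha e => hx (e ▸ ha)
      · intro y
        rw [PySem.Dict.getD_modify]
        by_cases hyx : y = x
        · subst hyx
          rw [if_pos rfl, hcnt y]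
          simp [List.count_append, List.count_eq_zero.mpr hx]
        · rw [if_neg hyx, hcnt y]
          simp [List.count_append, List.count_cons, Ne.symm hyx, hyx]

theorem foldl_agree (k : Int) (hk : 0 < k) (ids : List Int) :
    ∀ (out window : List Int) (cnt lp : PySem.Dict Int Int), InvAB k out window cnt lp →
      (ids.foldl (stepA k) (out, window, cnt)).1 = (ids.foldl (stepB k) (out, lp)).1 := by
  induction ids with
  | nil =>
    intro out window cnt lp _
    rfl
  | cons x ids ih =>
    intro out window cnt lp h
    obtain ⟨o', w', c', l', hA, hB, hI⟩ := step_agree k hk x out window cnt lp h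
    rw [List.foldl_cons, List.foldl_cons, hA, hB]
    exact ih o' w' c' l' hI

theorem invAB_init (k : Int) : InvAB k [] [] PySem.Dict.empty PySem.Dict.empty :=
  ⟨by simp, by simp, fun y => by simp [PySem.Dict.getD_empty], fun y => by
    simp [PySem.Dict.get?_empty, lastPosI]⟩

-- ===== VERDICT (by name: the statement is the Claim_ definition above) =====
theorem filter_no_repeat_within_k_spec : Claim_equal_filter_no_repeat_within_k := by
  intro ids k _
  unfold Spec_filter_no_repeat_within_k filter_no_repeat_within_k filter_no_repeat_within_k_alt
  by_cases hk : k ≤ 0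
  · simp [hk]
  · simp only [if_neg hk]
    exact foldl_agree k (by omega) ids [] [] _ _ (invAB_init k)
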